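-- pv_equiv track=rewrite | github.com/mismayil/morph-gen | src/morphology.py | surface_tr
-- ===== SOURCE A (Python) =====
-- from itertools import product
--
-- TURKISH_MORPH_MAP = {
--     "A": ["", "a", "e"],
--     "H": ["", "ı", "i", "u", "ü"],
--     "D": ["d", "t"],
--     "N": ["", "n"],
--     "Y": ["", "y"],
--     "S": ["", "s"],
--     "C": ["c", "ç"],
--     "E": ["e", "i"],
-- }
--
-- def surface_tr(morpheme):
--     char_sets = []
--
--     for i, char in enumerate(morpheme):
--         char_set = TURKISH_MORPH_MAP.get(char, [char.lower()])
--         if i == len(morpheme) - 1 and char == "k":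
--             char_set.append("ğ")
--         char_sets.append(char_set)
--
--     return ["".join(char_set) for char_set in list(product(*char_sets))]
-- ===== SOURCE B (Python) =====
-- TURKISH_MORPH_MAP = {
--     "A": ["", "a", "e"],
--     "H": ["", "ı", "i", "u", "ü"],
--     "D": ["d", "t"],
--     "N": ["", "n"],
--     "Y": ["", "y"],
--     "S": ["", "s"],
--     "C": ["c", "ç"],
--     "E": ["e", "i"],
-- }
--
-- def surface_tr(morpheme):
--     # Build the surface forms back-to-front: start from the option set of the
--     # LAST character (which absorbs the k -> ğ special case naturally) and walk
--     # the remaining characters right-to-left, prepending each option to every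
--     # already-built suffix.  No option-set list and no product tuples exist.
--     if not morpheme:
--         return [""]
--     last = morpheme[-1]
--     suffixes = list(TURKISH_MORPH_MAP.get(last, [last.lower()]))
--     if last == "k":
--         suffixes.append("ğ")
--     for ch in reversed(morpheme[:-1]):
--         opts = TURKISH_MORPH_MAP.get(ch, [ch.lower()])
--         suffixes = [o + s for o in opts for s in suffixes]
--     return suffixes
-- ===== Notes on version B (the rewrite author's own statement) =====
-- stated objective: alternative
-- what changed: Replaces the build-all-option-sets-then-itertools.product-then-join-tuples pipeline by a right-to-left pass: B starts from the option set of the last character (which carries the k->ğ case) and walks the remaining characters backwards, prepending each option to every already-built suffix, so no option-set list and no product tuples are ever materialised.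
import Mathlib
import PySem

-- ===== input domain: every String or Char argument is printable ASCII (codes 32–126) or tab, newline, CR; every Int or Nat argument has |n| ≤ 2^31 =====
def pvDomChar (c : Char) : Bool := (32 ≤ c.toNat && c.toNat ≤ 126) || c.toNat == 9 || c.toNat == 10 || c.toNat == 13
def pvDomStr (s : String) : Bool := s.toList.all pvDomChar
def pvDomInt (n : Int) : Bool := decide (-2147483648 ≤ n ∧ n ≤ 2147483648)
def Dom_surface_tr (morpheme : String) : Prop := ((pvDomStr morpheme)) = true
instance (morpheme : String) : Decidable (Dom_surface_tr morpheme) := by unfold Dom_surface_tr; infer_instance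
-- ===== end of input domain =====

-- B builds the surface forms back-to-front: it starts from the option set of the last
-- character and walks the rest right-to-left, prepending options to suffixes — no option-set
-- list and no product tuples (alternative decomposition, same cost).

-- shared module constant: TURKISH_MORPH_MAP (options as lists of chars; none = key absent)
def turkishMorphMap (c : Char) : Option (List (List Char)) :=
  if c = 'A' then some [[], ['a'], ['e']]
  else if c = 'H' then some [[], ['ı'], ['i'], ['u'], ['ü']]
  else if c = 'D' then some [['d'], ['t']]
  else if c = 'N' then some [[], ['n']]
  else if c = 'Y' then some [[], ['y']]
  else if c = 'S' then some [[], ['s']]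
  else if c = 'C' then some [['c'], ['ç']]
  else if c = 'E' then some [['e'], ['i']]
  else none

-- TURKISH_MORPH_MAP.get(char, [char.lower()])
def baseOpts (c : Char) : List (List Char) :=
  (turkishMorphMap c).getD [[PySem.Chars.lowerChar c]]

-- ===== PORT A =====
-- char_set = TURKISH_MORPH_MAP.get(char, [char.lower()]); final-k special case appended
def charOptions (n : Int) (i : Int) (c : Char) : List (List Char) :=
  let cs := baseOpts c
  if i = n - 1 ∧ c = 'k' then cs ++ [['ğ']] else cs

-- itertools.product(*char_sets), as the standard nested expansion (leftmost varies slowest)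
def prodA : List (List (List Char)) → List (List (List Char))
  | [] => [[]]
  | cs :: rest => cs.flatMap (fun o => (prodA rest).map (o :: ·))

def surface_tr (morpheme : String) : List String :=
  let l := morpheme.toList
  -- for i, char in enumerate(morpheme): … char_sets.append(char_set)
  let charSets :=
    (PySem.List.enumerate l).foldl
      (fun acc ic => acc ++ [charOptions (l.length : Int) ic.1 ic.2]) []
  -- ["".join(t) for t in product(*char_sets)]   ("".join = flatten of the char lists)
  (prodA charSets).map (fun t => String.ofList t.flatten)

-- ===== PORT B =====
def surface_tr_alt (morpheme : String) : List String :=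
  match morpheme.toList.reverse with
  | [] => [""]                           -- if not morpheme: return [""]
  | last :: revBody =>
    -- suffixes = list(MAP.get(last, [last.lower()]));  if last == "k": suffixes.append("ğ")
    let init := let b := baseOpts last; if last = 'k' then b ++ [['ğ']] else b
    -- for ch in reversed(morpheme[:-1]): suffixes = [o + s for o in opts for s in suffixes]
    (revBody.foldl
        (fun suffixes ch => (baseOpts ch).flatMap (fun o => suffixes.map (fun s => o ++ s)))
        init).map String.ofList

-- ===== PRECONDITION & SPEC =====
def Spec_surface_tr (morpheme : String) (out : List String) : Prop := out = surface_tr_alt morpheme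
instance (morpheme : String) (out : List String) : Decidable (Spec_surface_tr morpheme out) := by unfold Spec_surface_tr; infer_instance

-- ===== CLAIM (what is proved, stated in full; the proofs are below) =====
def Claim_equal_surface_tr : Prop := ∀ (morpheme : String), Dom_surface_tr morpheme → Spec_surface_tr morpheme (surface_tr morpheme)

-- ===== LEMMAS AND PROOFS =====

-- joining every product tuple = right fold extending suffixes by options
lemma prodA_flatten (css : List (List (List Char))) :
    (prodA css).map (fun t => t.flatten)
      = css.foldr (fun cs acc => cs.flatMap (fun o => acc.map (fun s => o ++ s))) [[]] := by
  induction css with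
  | nil => simp [prodA]
  | cons cs rest ih =>
      simp [prodA, List.map_flatMap, List.map_map, Function.comp_def, ← ih]

-- the enumerated option sets of body ++ [last] split into plain options and the last set
lemma enum_map_charOptions (body : List Char) (last : Char) :
    (PySem.List.enumerate (body ++ [last])).map
        (fun ic => charOptions ((body ++ [last]).length : Int) ic.1 ic.2)
      = body.map baseOpts
        ++ [charOptions ((body ++ [last]).length : Int) (body.length : Int) last] := by
  rw [PySem.List.enumerate_append]
  simp only [List.map_append]
  congr 1
  · have h : ∀ p ∈ PySem.List.enumerate body 0,
        charOptions ((body ++ [last]).length : Int) p.1 p.2 = baseOpts p.2 := by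
      intro p hp
      rcases (PySem.List.mem_enumerate_iff _ _ _).1 hp with ⟨k, hk, rfl⟩
      simp only [charOptions, List.length_append, List.length_cons, List.length_nil]
      have : ¬ ((0 : Int) + k = (body.length + 1 : Nat) - 1 ∧ body[k] = 'k') := by
        rintro ⟨h1, -⟩; omega
      simp only [this, if_false]
    rw [List.map_congr_left h]
    conv_rhs => rw [← PySem.List.map_snd_enumerate body 0]
    rw [List.map_map]
    rfl
  · simp [PySem.List.enumerate]

theorem surface_tr_spec : Claim_equal_surface_tr := by
  intro morpheme _
  unfold Spec_surface_tr surface_tr surface_tr_alt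
  simp only [PySem.List.foldl_append_singleton_eq_map, List.nil_append]
  cases hrev : morpheme.toList.reverse with
  | nil =>
      have h0 : morpheme.toList = [] := by
        have := congrArg List.reverse hrev; simpa using this
      simp [h0, prodA]
  | cons last revBody =>
      have hl : morpheme.toList = revBody.reverse ++ [last] := by
        have := congrArg List.reverse hrev; simpa using this
      rw [hl, enum_map_charOptions,
          show (fun t : List (List Char) => String.ofList t.flatten)
             = String.ofList ∘ (fun t : List (List Char) => t.flatten) from rfl,
          ← List.map_map, prodA_flatten, List.foldr_append, List.foldr_map,
          List.foldr_reverse]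
      simp only [List.foldr_cons, List.foldr_nil, List.map_cons, List.map_nil,
        List.flatMap_singleton', List.append_nil]
      congr 1
      simp only [charOptions, List.length_append, List.length_reverse, List.length_cons,
        List.length_nil]
      simp

-- ===== VERDICT (by name: the statement is the Claim_ definition above) =====
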